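-- pv_equiv track=rewrite | github.com/Megtev/Sing4God_Bot | songs/auto_add.py | list_to_html
-- ===== SOURCE A (Python) =====
-- def list_to_html(songs_list):
-- 	song_html = ''
-- 	for couplet in songs_list:
-- 		if couplet[0] == '*':
-- 			chorus = True
-- 		else:
-- 			chorus = False
--
-- 		for stroke in couplet:
-- 			if stroke == '*':
-- 				continue
-- 			elif chorus:
-- 				song_html += '<aside><strong>'
-- 				song_html += stroke + '</strong></aside>'
-- 			else:
-- 				song_html += '<aside>'
-- 				song_html += stroke + '</aside>'
--
-- 		song_html += '<aside><br></aside>'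
-- 	return song_html[:-19]
-- ===== SOURCE B (Python) =====
-- def list_to_html(songs_list):
--     if not songs_list:
--         return ''
--     head, tail = songs_list[0], songs_list[1:]
--     if head[0] == '*':
--         pre, suf = '<aside><strong>', '</strong></aside>'
--     else:
--         pre, suf = '<aside>', '</aside>'
--     strokes = [s for s in head if s != '*']
--     part = pre + (suf + pre).join(strokes) + suf if strokes else ''
--     if not tail:
--         return part
--     return part + '<aside><br></aside>' + list_to_html(tail)
-- ===== Notes on version B (the rewrite author's own statement) =====
-- stated objective: alternative
-- what changed: B recurses on the song list (head couplet plus recursive tail with the '<aside><br></aside>' separator) and renders each couplet as prefix + (suffix+prefix).join(strokes) + suffix instead of A's flat double loop that wraps every stroke, appends a separator after every couplet and trims the last 19 characters with a magic slice.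
import Mathlib
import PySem

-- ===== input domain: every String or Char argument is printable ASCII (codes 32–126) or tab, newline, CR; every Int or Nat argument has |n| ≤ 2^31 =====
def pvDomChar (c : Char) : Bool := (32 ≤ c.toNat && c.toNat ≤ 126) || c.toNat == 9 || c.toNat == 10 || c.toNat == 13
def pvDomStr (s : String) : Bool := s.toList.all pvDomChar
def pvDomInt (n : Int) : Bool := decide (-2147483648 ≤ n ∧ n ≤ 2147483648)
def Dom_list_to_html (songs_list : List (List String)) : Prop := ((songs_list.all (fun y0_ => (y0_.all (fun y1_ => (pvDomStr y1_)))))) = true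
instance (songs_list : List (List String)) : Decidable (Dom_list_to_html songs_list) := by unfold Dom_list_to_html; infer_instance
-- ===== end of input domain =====

-- B is a recursive decomposition: one couplet is rendered as prefix + (suffix+prefix).join(strokes) + suffix
-- instead of wrapping each stroke, and couplets are combined by recursion on the tail, removing A's
-- append-separator-then-[:-19]-trim scheme and its magic slice.

-- the separator string both programs use between couplets
def pvSep : List Char := "<aside><br></aside>".toList

-- ===== PORT A =====
-- inner loop body of A: one stroke appended to the accumulated html
def pvInnerA (chorus : Bool) (acc : List Char) (stroke : String) : List Char :=
  if stroke == "*" then acc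
  else if chorus then acc ++ "<aside><strong>".toList ++ (stroke.toList ++ "</strong></aside>".toList)
  else acc ++ "<aside>".toList ++ (stroke.toList ++ "</aside>".toList)

def list_to_html (songs_list : List (List String)) : String :=
  String.ofList (PySem.List.slice
    (songs_list.foldl (fun acc couplet =>
      let chorus := PySem.List.pyGetD couplet 0 "" == "*"
      (couplet.foldl (pvInnerA chorus) acc) ++ pvSep) [])
    none (some (-19)))

-- ===== PORT B =====
-- one couplet: pre + (suf+pre).join(strokes) + suf (empty if no strokes survive the filter)
def pvCoupletPart (couplet : List String) : List Char :=
  let chorus := PySem.List.pyGetD couplet 0 "" == "*"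
  let pre := if chorus then "<aside><strong>".toList else "<aside>".toList
  let suf := if chorus then "</strong></aside>".toList else "</aside>".toList
  let strokes := couplet.filter (fun s => s != "*")
  if strokes.isEmpty then []
  else pre ++ PySem.Chars.join (suf ++ pre) (strokes.map String.toList) ++ suf

def list_to_html_alt : List (List String) → String
  | [] => ""
  | head :: tail =>
    let part := pvCoupletPart head
    if tail.isEmpty then String.ofList part
    else String.ofList (part ++ pvSep ++ (list_to_html_alt tail).toList)

-- ===== PRECONDITION & SPEC =====
-- Pre_ excludes songs_list containing an empty couplet: there, Python A (and B) raise IndexError on couplet[0].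
def Pre_list_to_html (songs_list : List (List String)) : Prop :=
  ∀ c ∈ songs_list, c ≠ []
instance (songs_list : List (List String)) : Decidable (Pre_list_to_html songs_list) := by unfold Pre_list_to_html; infer_instance

def pvWitness_list_to_html : List (List String) := [["*", "la la"], ["verse 1"]]

def Spec_list_to_html (songs_list : List (List String)) (out : String) : Prop := out = list_to_html_alt songs_list
instance (songs_list : List (List String)) (out : String) : Decidable (Spec_list_to_html songs_list out) := by unfold Spec_list_to_html; infer_instance

-- ===== CLAIM (what is proved, stated in full; the proofs are below) =====
def Claim_equal_list_to_html : Prop := ∀ (songs_list : List (List String)), Dom_list_to_html songs_list → Pre_list_to_html songs_list → Spec_list_to_html songs_list (list_to_html songs_list)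

-- ===== LEMMAS AND PROOFS =====

-- spec form of one couplet: each surviving stroke wrapped in its tags
def pvWrap (chorus : Bool) (s : String) : List Char :=
  (if chorus then "<aside><strong>".toList else "<aside>".toList) ++ s.toList ++
  (if chorus then "</strong></aside>".toList else "</aside>".toList)

def pvPartFlat (couplet : List String) : List Char :=
  let chorus := PySem.List.pyGetD couplet 0 "" == "*"
  (couplet.filter (fun s => s != "*")).flatMap (pvWrap chorus)

-- A's inner loop over one couplet appends exactly the wrapped strokes
theorem pvInner_eq (chorus : Bool) (couplet : List String) :
    ∀ acc : List Char, couplet.foldl (pvInnerA chorus) acc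
      = acc ++ (couplet.filter (fun s => s != "*")).flatMap (pvWrap chorus) := by
  induction couplet with
  | nil => simp
  | cons s rest ih =>
    intro acc
    rw [List.foldl_cons, ih, List.filter_cons]
    by_cases h : s = "*"
    · simp [pvInnerA, h]
    · cases chorus <;> simp [pvInnerA, pvWrap, h]

-- A's outer loop appends part ++ separator for every couplet
theorem pvOuter_eq (L : List (List String)) :
    ∀ acc : List Char,
      L.foldl (fun acc couplet =>
        let chorus := PySem.List.pyGetD couplet 0 "" == "*"
        (couplet.foldl (pvInnerA chorus) acc) ++ pvSep) acc
      = acc ++ L.flatMap (fun c => pvPartFlat c ++ pvSep) := by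
  induction L with
  | nil => simp
  | cons c rest ih =>
    intro acc
    rw [List.foldl_cons, ih, List.flatMap_cons]
    show (c.foldl (pvInnerA _) acc ++ pvSep) ++ _ = _
    rw [pvInner_eq]
    simp [pvPartFlat]

-- the prefix/composite-separator-join/suffix form of one couplet equals the wrapped-strokes form
theorem pvJoinWrap (chorus : Bool) (xs : List String) (h : xs ≠ []) :
    (if chorus then "<aside><strong>".toList else "<aside>".toList) ++
      PySem.Chars.join ((if chorus then "</strong></aside>".toList else "</aside>".toList) ++
        (if chorus then "<aside><strong>".toList else "<aside>".toList)) (xs.map String.toList) ++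
      (if chorus then "</strong></aside>".toList else "</aside>".toList)
    = xs.flatMap (pvWrap chorus) := by
  induction xs with
  | nil => simp at h
  | cons x rest ih =>
    cases rest with
    | nil => simp [PySem.Chars.join_singleton, pvWrap]
    | cons y rest' =>
      simp only [List.map_cons]
      rw [PySem.Chars.join_cons_cons, List.flatMap_cons, ← ih (by simp)]
      simp only [List.map_cons]
      simp [pvWrap]

theorem pvCoupletPart_eq (c : List String) : pvCoupletPart c = pvPartFlat c := by
  unfold pvCoupletPart pvPartFlat
  by_cases h : c.filter (fun s => s != "*") = []
  · simp [h]
  · rw [if_neg (by simpa using h)]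
    exact pvJoinWrap _ _ h

-- trailing-separator flatten equals separator join followed by one separator (nonempty list)
theorem pvFlat_eq_join (ps : List (List Char)) (h : ps ≠ []) :
    ps.flatMap (fun p => p ++ pvSep) = PySem.Chars.join pvSep ps ++ pvSep := by
  induction ps with
  | nil => simp at h
  | cons p rest ih =>
    cases rest with
    | nil => simp [PySem.Chars.join_singleton]
    | cons q rest' =>
      simp only [List.flatMap_cons] at ih ⊢
      rw [ih (by simp), PySem.Chars.join_cons_cons]
      simp

-- B's recursion computes the separator join of the couplet parts
theorem pvAlt_eq (L : List (List String)) :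
    (list_to_html_alt L).toList = PySem.Chars.join pvSep (L.map pvPartFlat) := by
  induction L with
  | nil => simp [list_to_html_alt]
  | cons c rest ih =>
    cases rest with
    | nil => simp [list_to_html_alt, PySem.Chars.join_singleton, pvCoupletPart_eq]
    | cons d rest' =>
      show (String.ofList _).toList = _
      rw [List.map_cons, List.map_cons, PySem.Chars.join_cons_cons]
      simp [ih, pvCoupletPart_eq]

-- ===== VERDICT (by name: the statement is the Claim_ definition above) =====
theorem list_to_html_spec : Claim_equal_list_to_html := by
  intro songs_list _ _
  show list_to_html songs_list = list_to_html_alt songs_list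
  have halt := pvAlt_eq songs_list
  unfold list_to_html
  rw [pvOuter_eq, List.nil_append]
  cases songs_list with
  | nil => decide
  | cons c rest =>
    have hflat : (c :: rest).flatMap (fun x => pvPartFlat x ++ pvSep)
        = PySem.Chars.join pvSep ((c :: rest).map pvPartFlat) ++ pvSep := by
      rw [← pvFlat_eq_join _ (by simp)]
      simp [List.flatMap_map]
    rw [hflat, PySem.List.slice_to_neg_ofNat _ 19 (by omega)]
    have h19 : pvSep.length = 19 := by decide
    rw [← halt]
    simp [h19]
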